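-- pv_equiv track=rewrite | github.com/JoJjjo174/aoc2025 | 4/main.py | remove_locations
-- ===== SOURCE A (Python) =====
-- def remove_locations(diagram, locations):
--     new_diagram = []
--
--     for row_i, row in enumerate(diagram):
--         new_row = row
--         for col_i, col in enumerate(row):
--
--
--             loc = (row_i, col_i)
--             if loc in locations:
--                 new_row = new_row[:col_i] + "." + new_row[col_i+1:]
--
--         new_diagram.append(new_row)
--
--     return new_diagram
-- ===== SOURCE B (Python) =====
-- def remove_locations(diagram, locations):
--     rows = [list(row) for row in diagram]
--     for r, c in locations:
--         if 0 <= r < len(rows) and 0 <= c < len(rows[r]):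
--             rows[r][c] = "."
--     return ["".join(row) for row in rows]
-- ===== Notes on version B (the rewrite author's own statement) =====
-- stated objective: alternative
-- what changed: Instead of scanning every cell of every row and rebuilding the row by string slicing on each hit, B converts rows to char lists once, iterates only over the locations list setting in-range cells to '.', and joins each row once.
import Mathlib
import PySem

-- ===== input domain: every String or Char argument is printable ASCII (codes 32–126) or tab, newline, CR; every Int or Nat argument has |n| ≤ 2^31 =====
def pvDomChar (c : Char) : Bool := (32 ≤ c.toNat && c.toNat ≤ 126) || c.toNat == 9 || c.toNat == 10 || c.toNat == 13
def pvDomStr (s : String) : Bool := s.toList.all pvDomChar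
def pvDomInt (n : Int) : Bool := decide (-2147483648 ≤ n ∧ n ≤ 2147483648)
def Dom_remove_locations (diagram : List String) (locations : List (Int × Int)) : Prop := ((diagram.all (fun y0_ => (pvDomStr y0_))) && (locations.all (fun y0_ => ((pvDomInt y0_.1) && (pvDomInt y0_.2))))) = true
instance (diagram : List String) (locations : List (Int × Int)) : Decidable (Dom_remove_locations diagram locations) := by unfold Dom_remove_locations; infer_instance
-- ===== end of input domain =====

-- B replaces A's scan of every cell (with repeated string slicing per hit) by one pass
-- over the locations only, mutating rows held as char lists; return value only, A mutates nothing.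

-- ===== PORT A =====
-- inner loop over the columns of one row: 'for col_i, col in enumerate(row): …'
def removeRowA (locations : List (Int × Int)) (row_i : Int) (row : String) : String :=
  (PySem.List.enumerate row.toList).foldl
    (fun new_row p =>
      if (row_i, p.1) ∈ locations then
        PySem.Str.slice new_row none (some p.1) ++ "." ++ PySem.Str.slice new_row (some (p.1 + 1)) none
      else new_row)
    row

def remove_locations (diagram : List String) (locations : List (Int × Int)) : List String :=
  (PySem.List.enumerate diagram).foldl
    (fun new_diagram p => new_diagram ++ [removeRowA locations p.1 p.2]) []

-- ===== PORT B =====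
-- one conditional in-place write per location: 'if 0 <= r < len(rows) and 0 <= c < len(rows[r]): rows[r][c] = "."'
def setLocB (rows : List (List Char)) (rc : Int × Int) : List (List Char) :=
  if 0 ≤ rc.1 ∧ rc.1 < (rows.length : Int) ∧ 0 ≤ rc.2 ∧ rc.2 < ((rows.getD rc.1.toNat []).length : Int) then
    rows.set rc.1.toNat ((rows.getD rc.1.toNat []).set rc.2.toNat '.')
  else rows

def remove_locations_alt (diagram : List String) (locations : List (Int × Int)) : List String :=
  let rows := diagram.map (fun row => row.toList)
  let rows := locations.foldl setLocB rows
  rows.map (fun row => String.ofList row)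

-- ===== PRECONDITION & SPEC =====
def Spec_remove_locations (diagram : List String) (locations : List (Int × Int)) (out : List String) : Prop := out = remove_locations_alt diagram locations
instance (diagram : List String) (locations : List (Int × Int)) (out : List String) : Decidable (Spec_remove_locations diagram locations out) := by unfold Spec_remove_locations; infer_instance

-- ===== CLAIM (what is proved, stated in full; the proofs are below) =====
def Claim_equal_remove_locations : Prop := ∀ (diagram : List String) (locations : List (Int × Int)), Dom_remove_locations diagram locations → Spec_remove_locations diagram locations (remove_locations diagram locations)

-- ===== LEMMAS AND PROOFS =====

-- the common normal form: cell (i, j) becomes '.' exactly when (i, j) is listed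
def pvCell (locations : List (Int × Int)) (i : Int) (j : Nat) (ch : Char) : Char :=
  if (i, (j : Int)) ∈ locations then '.' else ch

lemma mapIdx_eq_set (l : List Char) (k : Nat) (a : Char) :
    l.mapIdx (fun j ch => if j = k then a else ch) = l.set k a := by
  apply List.ext_getElem (by simp)
  intro i h1 h2
  simp only [List.getElem_mapIdx, List.getElem_set]
  by_cases hik : i = k
  · simp [hik]
  · simp only [hik, if_false]
    rw [if_neg (fun h => hik h.symm)]

lemma pv_splice (locations : List (Int × Int)) (ri : Int) (nr : String) (k : Nat)
    (hk : k < nr.toList.length) :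
    (if (ri, (k : Int)) ∈ locations then
        PySem.Str.slice nr none (some (k : Int)) ++ "." ++ PySem.Str.slice nr (some ((k : Int) + 1)) none
      else nr)
    = String.ofList (nr.toList.mapIdx (fun j ch => if j = k then pvCell locations ri j ch else ch)) := by
  by_cases hmem : (ri, (k : Int)) ∈ locations
  · simp only [hmem, if_pos]
    have hfun : (fun (j : Nat) (ch : Char) => if j = k then pvCell locations ri j ch else ch)
        = (fun j ch => if j = k then '.' else ch) := by
      funext j ch
      by_cases hj : j = k
      · subst hj; simp [pvCell, hmem]
      · simp [hj]
    rw [hfun]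
    apply String.toList_inj.mp
    rw [mapIdx_eq_set]
    have h1 : (PySem.Str.slice nr none (some (k:Int))).toList = nr.toList.take k := by
      simp [PySem.List.slice_to_natCast]
    have h2 : (PySem.Str.slice nr (some ((k:Int)+1)) none).toList = nr.toList.drop (k+1) := by
      rw [show ((k:Int)+1) = (((k+1):Nat):Int) by push_cast; ring]
      rw [PySem.Str.toList_slice, PySem.Chars.slice_eq_listSlice, PySem.List.slice_from_natCast]
    rw [String.toList_append, String.toList_append, h1, h2]
    rw [List.set_eq_take_cons_drop _ hk, String.toList_ofList]
    simp
  · simp only [hmem, if_false]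
    have h : nr.toList.mapIdx (fun j ch => if j = k then pvCell locations ri j ch else ch) = nr.toList := by
      apply List.ext_getElem (by simp)
      intro i h1 h2
      simp only [List.getElem_mapIdx]
      by_cases hik : i = k
      · subst hik; simp [pvCell, hmem]
      · simp [hik]
    rw [h]
    exact String.ofList_toList.symm


lemma pv_innerA (locations : List (Int × Int)) (ri : Int) :
    ∀ (l : List Char) (k : Nat) (cur : String), cur.toList.length = k + l.length →
    (PySem.List.enumerate l (k : Int)).foldl
      (fun new_row p =>
        if (ri, p.1) ∈ locations then
          PySem.Str.slice new_row none (some p.1) ++ "." ++ PySem.Str.slice new_row (some (p.1 + 1)) none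
        else new_row) cur
    = String.ofList (cur.toList.mapIdx (fun j ch => if k ≤ j then pvCell locations ri j ch else ch)) := by
  intro l
  induction l with
  | nil =>
    intro k cur hlen
    rw [PySem.List.enumerate_nil, List.foldl_nil]
    have h : cur.toList.mapIdx (fun j ch => if k ≤ j then pvCell locations ri j ch else ch) = cur.toList := by
      apply List.ext_getElem (by simp)
      intro i h1 h2
      have : ¬ k ≤ i := by simp at h1 hlen; omega
      simp [List.getElem_mapIdx, this]
    rw [h]; exact String.ofList_toList.symm
  | cons c l' ih =>
    intro k cur hlen
    rw [PySem.List.enumerate_cons, List.foldl_cons]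
    rw [pv_splice locations ri cur k (by simp at hlen ⊢; omega)]
    rw [show (k:Int) + 1 = ((k+1 : Nat) : Int) by push_cast; ring]
    rw [ih (k+1) _ (by simp at hlen ⊢; omega)]
    congr 1
    rw [String.toList_ofList]
    apply List.ext_getElem (by simp)
    intro i h1 h2
    simp only [List.getElem_mapIdx]
    by_cases hik : i = k
    · subst hik
      simp [pvCell]
    · by_cases hk1 : k + 1 ≤ i
      · have hk : k ≤ i := by omega
        simp [hik, hk1, hk]
      · have hk : ¬ k ≤ i := by omega
        simp [hik, hk1, hk]


lemma length_setLocB (rows : List (List Char)) (rc : Int × Int) : (setLocB rows rc).length = rows.length := by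
  unfold setLocB; split_ifs <;> simp


lemma getElem_setLocB (rows : List (List Char)) (rc : Int × Int) (i : Nat) (hi : i < rows.length)
    (hi' : i < (setLocB rows rc).length) :
    (setLocB rows rc)[i] =
      if ((i : Int) = rc.1) then (rows[i].mapIdx fun j ch => if (j : Int) = rc.2 then '.' else ch)
      else rows[i] := by
  have hgetD : rows.getD i [] = rows[i] := by
    rw [List.getD_eq_getElem?_getD, List.getElem?_eq_getElem hi]; rfl
  unfold setLocB at hi' ⊢
  split_ifs at hi' ⊢ with hg
  · obtain ⟨h1, h2, h3, h4⟩ := hg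
    by_cases hir : (i : Int) = rc.1
    · have hrt : rc.1.toNat = i := by omega
      rw [if_pos hir]
      rw [List.getElem_set, if_pos hrt, hrt, hgetD]
      simp only [← hir, Int.toNat_natCast, hgetD] at h4
      apply List.ext_getElem (by simp)
      intro j hj1 hj2
      rw [List.getElem_set, List.getElem_mapIdx]
      have : rc.2.toNat = j ↔ (j : Int) = rc.2 := by omega
      by_cases hjc : (j : Int) = rc.2
      · rw [if_pos (this.mpr hjc), if_pos hjc]
      · rw [if_neg (fun h => hjc (this.mp h)), if_neg hjc]
    · have hrt : ¬ rc.1.toNat = i := by omega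
      rw [if_neg hir, List.getElem_set, if_neg hrt]
  · by_cases hir : (i : Int) = rc.1
    · rw [if_pos hir]
      have hrt : rc.1.toNat = i := by omega
      rw [hrt, hgetD] at hg
      apply List.ext_getElem (by simp)
      intro j hj1 hj2
      rw [List.getElem_mapIdx]
      have : ¬ ((j : Int) = rc.2) := by
        intro h
        apply hg
        refine ⟨by rw [← hir]; exact Int.natCast_nonneg i, by rw [← hir]; exact_mod_cast hi, by omega, by omega⟩
      rw [if_neg this]
    · rw [if_neg hir]

lemma pv_foldB : ∀ (locations : List (Int × Int)) (rows : List (List Char)),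
    locations.foldl setLocB rows
    = rows.mapIdx (fun i row => row.mapIdx (fun j ch => pvCell locations (i : Int) j ch)) := by
  intro locations
  induction locations with
  | nil =>
    intro rows
    rw [List.foldl_nil]
    apply List.ext_getElem (by simp)
    intro i h1 h2
    simp only [List.getElem_mapIdx, pvCell]
    simp only [List.not_mem_nil, if_false]
    exact (List.ext_getElem (by simp) (fun j hj1 hj2 => by simp)).symm
  | cons rc rest ih =>
    intro rows
    rw [List.foldl_cons, ih]
    apply List.ext_getElem (by simp [length_setLocB])
    intro i h1 h2
    have hi : i < rows.length := by simpa [length_setLocB] using h1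
    rw [List.getElem_mapIdx, List.getElem_mapIdx,
        getElem_setLocB rows rc i hi (by rw [length_setLocB]; exact hi)]
    by_cases hir : (i : Int) = rc.1
    · rw [if_pos hir]
      apply List.ext_getElem (by simp)
      intro j hj1 hj2
      rw [List.getElem_mapIdx, List.getElem_mapIdx, List.getElem_mapIdx]
      unfold pvCell
      by_cases hjc : (j : Int) = rc.2
      · have hp : ((i : Int), (j : Int)) = rc := by cases rc; simp_all
        have hm : ((i : Int), (j : Int)) ∈ rc :: rest := by rw [hp]; exact List.mem_cons_self
        rw [if_pos hjc, ite_self, if_pos hm]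
      · have hp : ((i : Int), (j : Int)) ≠ rc := fun h => hjc (by rw [← h])
        simp [hjc, hp]
    · rw [if_neg hir]
      apply List.ext_getElem (by simp)
      intro j hj1 hj2
      rw [List.getElem_mapIdx, List.getElem_mapIdx]
      unfold pvCell
      have hp : ((i : Int), (j : Int)) ≠ rc := fun h => hir (by rw [← h])
      simp [hp]

-- ===== VERDICT (by name: the statement is the Claim_ definition above) =====
theorem remove_locations_spec : Claim_equal_remove_locations := by
  intro diagram locations _
  unfold Spec_remove_locations remove_locations remove_locations_alt
  rw [PySem.List.foldl_append_singleton_eq_map, List.nil_append]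
  show _ = List.map (fun row => String.ofList row)
      (List.foldl setLocB (diagram.map (fun row => row.toList)) locations)
  rw [pv_foldB]
  apply List.ext_getElem (by simp [PySem.List.length_enumerate])
  intro i h1 h2
  have hid : i < diagram.length := by simpa [PySem.List.length_enumerate] using h1
  rw [List.getElem_map, List.getElem_map, List.getElem_mapIdx, PySem.List.getElem_enumerate]
  unfold removeRowA
  dsimp only
  rw [show (0 : Int) + (i:Int) = ((i:Nat):Int) by ring]
  have hinner := pv_innerA locations ((i:Nat):Int) diagram[i].toList 0 diagram[i] (by simp)
  rw [Nat.cast_zero] at hinner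
  rw [hinner]
  congr 1
  rw [List.getElem_map]
  apply List.ext_getElem (by simp)
  intro j hj1 hj2
  simp [List.getElem_mapIdx]
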